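-- pv_equiv track=rewrite | github.com/aditya109/data-structures-and-algorithms | codesignal/extractEachKth.py | extractEachKth
-- ===== SOURCE A (Python) =====
-- def extractEachKth(inputArray, k):
--     count = 1
--     result = []
--     for e in inputArray:
--          if count % k != 0:
--              result.append(e)
--          count+=1
--     return result
-- ===== SOURCE B (Python) =====
-- def extractEachKth(inputArray, k):
--     result = []
--     for i in range(0, len(inputArray), k):
--         result.extend(inputArray[i:i + k - 1])
--     return result
-- ===== Notes on version B (the rewrite author's own statement) =====
-- stated objective: faster
-- what changed: Replaces the per-element counter-and-modulus loop with a stride walk over range(0, n, k) that copies each block's first k-1 elements at once via a slice; Pre_ restricts to the task's natural domain k >= 1 (A raises ZeroDivisionError for k = 0 on non-empty input, and for k <= 0 A's values are accidents of Python's modulus, outside the task's meaning).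
-- outside the precondition, e.g. on extractEachKth([1, 2, 3], -2): A returns [1, 3], B returns []; on extractEachKth([], 0): A returns [], B raises ValueError; on extractEachKth([1], 0): A raises ZeroDivisionError, B raises ValueError
import Mathlib
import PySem

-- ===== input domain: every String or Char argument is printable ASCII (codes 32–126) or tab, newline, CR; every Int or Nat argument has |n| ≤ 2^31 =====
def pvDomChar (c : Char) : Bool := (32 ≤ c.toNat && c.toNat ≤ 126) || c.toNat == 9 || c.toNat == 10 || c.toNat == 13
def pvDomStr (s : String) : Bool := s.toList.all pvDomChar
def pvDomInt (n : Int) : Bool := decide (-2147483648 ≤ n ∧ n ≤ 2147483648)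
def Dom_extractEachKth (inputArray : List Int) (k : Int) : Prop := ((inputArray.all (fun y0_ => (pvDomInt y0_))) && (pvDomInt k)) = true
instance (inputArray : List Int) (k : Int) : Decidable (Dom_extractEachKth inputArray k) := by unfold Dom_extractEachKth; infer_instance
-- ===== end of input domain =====

-- B walks the array in strides of k (for i in range(0, n, k)) and copies each
-- block's first k-1 elements via a slice, instead of A's per-element counter
-- with a modulus test.

-- ===== PORT A =====
def extractEachKth (inputArray : List Int) (k : Int) : List Int :=
  (inputArray.foldl
    (fun (s : Int × List Int) e =>
      (s.1 + 1, if PySem.Int.mod s.1 k ≠ 0 then s.2 ++ [e] else s.2))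
    ((1 : Int), ([] : List Int))).2

-- ===== PORT B =====
def extractEachKth_alt (inputArray : List Int) (k : Int) : List Int :=
  (PySem.List.pyRange 0 (inputArray.length : Int) k).foldl
    (fun result i => result ++ PySem.List.slice inputArray (some i) (some (i + k - 1)))
    []

-- ===== PRECONDITION & SPEC =====
-- Pre_ restricts to the task's natural domain k ≥ 1: A raises ZeroDivisionError
-- for k = 0 on non-empty input, and for k ≤ 0 A's behaviour (dropping multiples
-- of |k|, or returning [] only when the array is empty) is an accident of
-- Python's modulus on a negative divisor, outside the task's meaning.
def Pre_extractEachKth (inputArray : List Int) (k : Int) : Prop := 1 ≤ k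
instance (inputArray : List Int) (k : Int) : Decidable (Pre_extractEachKth inputArray k) := by
  unfold Pre_extractEachKth; infer_instance
def pvWitness_extractEachKth : List Int × Int := ([1, 2, 3, 4, 5], 2)

def Spec_extractEachKth (inputArray : List Int) (k : Int) (out : List Int) : Prop :=
  out = extractEachKth_alt inputArray k
instance (inputArray : List Int) (k : Int) (out : List Int) : Decidable (Spec_extractEachKth inputArray k out) := by
  unfold Spec_extractEachKth; infer_instance

-- ===== CLAIM (what is proved, stated in full; the proofs are below) =====
def Claim_equal_extractEachKth : Prop := ∀ (inputArray : List Int) (k : Int),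
  Dom_extractEachKth inputArray k → Pre_extractEachKth inputArray k →
  Spec_extractEachKth inputArray k (extractEachKth inputArray k)

-- ===== LEMMAS AND PROOFS =====

-- common abstraction: keep elements whose (1-based) counter is not divisible by s
def pvKeep (s : Int) (c : Int) : List Int → List Int
  | [] => []
  | e :: t => if ¬ s ∣ c then e :: pvKeep s (c + 1) t else pvKeep s (c + 1) t

lemma pvA_fold (k : Int) : ∀ (arr : List Int) (c : Int) (r : List Int),
    (arr.foldl
      (fun (s : Int × List Int) e =>
        (s.1 + 1, if PySem.Int.mod s.1 k ≠ 0 then s.2 ++ [e] else s.2))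
      (c, r)).2 = r ++ pvKeep k c arr := by
  intro arr
  induction arr with
  | nil => intro c r; simp [pvKeep]
  | cons e t ih =>
    intro c r
    simp only [List.foldl_cons, pvKeep]
    rw [ih]
    by_cases h : k ∣ c
    · have : PySem.Int.mod c k = 0 := (PySem.Int.mod_eq_zero_iff_dvd c k).mpr h
      simp [this, h]
    · have : PySem.Int.mod c k ≠ 0 := by
        intro h0; exact h ((PySem.Int.mod_eq_zero_iff_dvd c k).mp h0)
      simp [this, h]

lemma pvKeep_period (s : Int) : ∀ (arr : List Int) (c : Int),
    pvKeep s (c + s) arr = pvKeep s c arr := by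
  intro arr
  induction arr with
  | nil => intro c; simp [pvKeep]
  | cons e t ih =>
    intro c
    have hdvd : (s ∣ c + s) ↔ (s ∣ c) := by
      constructor
      · intro h; have := (Int.dvd_add_right (dvd_refl s)).mp (by rwa [add_comm] at h); exact this
      · intro h; exact dvd_add h (dvd_refl s)
    simp only [pvKeep, hdvd]
    have : c + s + 1 = (c + 1) + s := by ring
    rw [this, ih]

lemma pvKeep_block (s : Int) : ∀ (j : Nat) (c : Int),
    (∀ i : Nat, i < j → ¬ s ∣ (c + i)) → s ∣ (c + j) →
    ∀ arr : List Int,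
      pvKeep s c arr = arr.take j ++ pvKeep s (c + j + 1) (arr.drop (j + 1)) := by
  intro j
  induction j with
  | zero =>
    intro c _ hdvd arr
    cases arr with
    | nil => simp [pvKeep]
    | cons e t =>
      have h : s ∣ c := by simpa using hdvd
      simp [pvKeep, h]
  | succ j ih =>
    intro c hno hdvd arr
    cases arr with
    | nil => simp [pvKeep]
    | cons e t =>
      have h0 : ¬ s ∣ c := by simpa using hno 0 (Nat.succ_pos j)
      have hno' : ∀ i : Nat, i < j → ¬ s ∣ (c + 1 + (i : Int)) := by
        intro i hi
        have := hno (i + 1) (by omega)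
        have harg : c + ((i : Nat) + 1 : Nat) = c + 1 + (i : Int) := by push_cast; ring
        rwa [harg] at this
      have hdvd' : s ∣ (c + 1 + (j : Int)) := by
        have harg : c + ((j : Nat) + 1 : Nat) = c + 1 + (j : Int) := by push_cast; ring
        rwa [harg] at hdvd
      have := ih (c + 1) hno' hdvd' t
      simp only [pvKeep, h0, not_false_iff, if_pos, List.take_succ_cons, List.drop_succ_cons]
      rw [this]
      have harg : c + 1 + (j : Int) + 1 = c + ((j : Nat) + 1 : Nat) + 1 := by push_cast; ring
      rw [harg]
      simp

lemma pvKeep_one_step (s : Int) (hs : 1 ≤ s) (arr : List Int) :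
    pvKeep s 1 arr = arr.take (s.toNat - 1) ++ pvKeep s 1 (arr.drop s.toNat) := by
  have hno : ∀ i : Nat, i < s.toNat - 1 → ¬ s ∣ ((1 : Int) + i) := by
    intro i hi hdvd
    have h1 : (0 : Int) < 1 + i := by positivity
    have h2 : (1 : Int) + i < s := by omega
    have := Int.le_of_dvd h1 hdvd
    omega
  have hdvd : s ∣ ((1 : Int) + ((s.toNat - 1 : Nat) : Int)) := by
    have : (1 : Int) + ((s.toNat - 1 : Nat) : Int) = s := by omega
    rw [this]
  have := pvKeep_block s (s.toNat - 1) 1 hno hdvd arr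
  rw [this]
  have h1 : (1 : Int) + ((s.toNat - 1 : Nat) : Int) + 1 = 1 + s := by omega
  have h2 : (s.toNat - 1) + 1 = s.toNat := by omega
  rw [h1, h2, pvKeep_period]

-- range(a, b, s) with 0 < s and a < b starts with a and continues from a + s
lemma pvRange_pos_cons (a b s : Int) (hs : 0 < s) (hab : a < b) :
    PySem.List.pyRange a b s = a :: PySem.List.pyRange (a + s) b s := by
  rw [PySem.List.pyRange_of_pos a b hs, PySem.List.pyRange_of_pos (a + s) b hs]
  have hm : (if a + s < b then ((b - (a + s) + s - 1) / s).toNat else 0)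
      = ((b - a - 1) / s).toNat := by
    by_cases h : a + s < b
    · simp only [h, if_pos]
      have harg : b - (a + s) + s - 1 = b - a - 1 := by ring
      rw [harg]
    · simp only [h, if_neg, not_false_iff]
      have : (b - a - 1) / s = 0 := Int.ediv_eq_zero_of_lt (by omega) (by omega)
      simp [this]
  have hn : (if a < b then ((b - a + s - 1) / s).toNat else 0)
      = ((b - a - 1) / s).toNat + 1 := by
    simp only [hab, if_pos]
    have h1 : b - a + s - 1 = (b - a - 1) + 1 * s := by ring
    rw [h1, Int.add_mul_ediv_right _ _ (by omega : s ≠ 0)]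
    have hq0 : 0 ≤ (b - a - 1) / s := Int.ediv_nonneg (by omega) (by omega)
    omega
  rw [hm, hn, List.range_succ_eq_map]
  simp only [List.map_cons, List.map_map, Nat.cast_zero, mul_zero, add_zero]
  congr 1
  apply List.map_congr_left
  intro x _
  simp [Function.comp, Nat.succ_eq_add_one]
  push_cast
  ring

lemma pvB_fold (k : Int) (hk : 1 ≤ k) (arr : List Int) :
    ∀ (fuel : Nat) (i : Nat) (r : List Int), arr.length - i < fuel →
    (PySem.List.pyRange (i : Int) (arr.length : Int) k).foldl
      (fun result j => result ++ PySem.List.slice arr (some j) (some (j + k - 1))) r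
      = r ++ pvKeep k 1 (arr.drop i) := by
  intro fuel
  induction fuel with
  | zero => intro i r h; omega
  | succ f ih =>
    intro i r h
    by_cases hi : i < arr.length
    · rw [pvRange_pos_cons _ _ _ (by omega) (by exact_mod_cast hi)]
      simp only [List.foldl_cons]
      have hc2 : (i : Int) + k - 1 = (i : Int) + ((k.toNat - 1 : Nat) : Int) := by
        push_cast; omega
      rw [hc2, PySem.List.slice_natCast_add]
      have hcast : (i : Int) + k = ((i + k.toNat : Nat) : Int) := by push_cast; omega
      rw [hcast, ih (i + k.toNat) _ (by omega)]
      rw [pvKeep_one_step k hk (arr.drop i)]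
      simp [List.drop_drop, Nat.add_comm, List.append_assoc]
    · have hnil : PySem.List.pyRange (i : Int) (arr.length : Int) k = [] := by
        rw [PySem.List.pyRange_of_pos _ _ (by omega : (0 : Int) < k)]
        have : ¬ ((i : Int) < (arr.length : Int)) := by exact_mod_cast hi
        simp [this]
      have hdrop : arr.drop i = [] := List.drop_eq_nil_of_le (by omega)
      simp [hnil, hdrop, pvKeep]

-- ===== VERDICT (by name: the statement is the Claim_ definition above) =====
theorem extractEachKth_spec : Claim_equal_extractEachKth := by
  intro arr k _ hpre
  unfold Spec_extractEachKth extractEachKth extractEachKth_alt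
  rw [pvA_fold k arr 1 []]
  have := pvB_fold k hpre arr (arr.length + 1) 0 [] (by omega)
  simp only [Nat.cast_zero, List.nil_append] at this ⊢
  exact this.symm
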